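-- pv_equiv track=rewrite | github.com/vdeeplearning/tailo-typer | src/tailo_converter.py | find_tone_target
-- ===== SOURCE A (Python) =====
-- def find_tone_target(syllable: str) -> int | None:
--     """Return the index of the letter that should receive the tone mark.
--
--     This MVP uses a simple Tai-lo-friendly heuristic:
--     1. Prefer `a`
--     2. Then `e`
--     3. Then `oo`, marked on the first `o`
--     4. Then `o`
--     5. Then `i`
--     6. Then `u`
--     7. Then syllabic `m` or `n`
--
--     This is intentionally isolated so the rule can be improved later.
--     """
--     lower = syllable.lower()
--
--     for vowel in ("a", "e"):
--         index = lower.find(vowel)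
--         if index != -1:
--             return index
--
--     oo_index = lower.find("oo")
--     if oo_index != -1:
--         return oo_index
--
--     for vowel in ("o", "i", "u", "m", "n"):
--         index = lower.find(vowel)
--         if index != -1:
--             return index
--
--     return None
-- ===== SOURCE B (Python) =====
-- def find_tone_target(syllable: str) -> int | None:
--     """Single left-to-right scan keeping the best (rank, index) candidate.
--
--     Ranks: a=0, e=1, first o of an 'oo' pair=2, o=3, i=4, u=5, m=6, n=7.
--     A candidate replaces the current best only on a strictly smaller rank,
--     so the earliest position within a rank class wins.
--     """
--     lower = syllable.lower()
--     n = len(lower)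
--     best = None  # (rank, index)
--     for i, ch in enumerate(lower):
--         if ch == 'a':
--             rank = 0
--         elif ch == 'e':
--             rank = 1
--         elif ch == 'o':
--             rank = 2 if i + 1 < n and lower[i + 1] == 'o' else 3
--         elif ch == 'i':
--             rank = 4
--         elif ch == 'u':
--             rank = 5
--         elif ch == 'm':
--             rank = 6
--         elif ch == 'n':
--             rank = 7
--         else:
--             continue
--         if best is None or rank < best[0]:
--             best = (rank, i)
--     return best[1] if best is not None else None
-- ===== Notes on version B (the rewrite author's own statement) =====
-- stated objective: alternative
-- what changed: Replaces the priority-ordered chain of up to eight substring .find() passes with one left-to-right scan that ranks each character (with an 'oo' lookahead) and keeps the best (rank, index) pair, replacing only on strictly smaller rank.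
import Mathlib
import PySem

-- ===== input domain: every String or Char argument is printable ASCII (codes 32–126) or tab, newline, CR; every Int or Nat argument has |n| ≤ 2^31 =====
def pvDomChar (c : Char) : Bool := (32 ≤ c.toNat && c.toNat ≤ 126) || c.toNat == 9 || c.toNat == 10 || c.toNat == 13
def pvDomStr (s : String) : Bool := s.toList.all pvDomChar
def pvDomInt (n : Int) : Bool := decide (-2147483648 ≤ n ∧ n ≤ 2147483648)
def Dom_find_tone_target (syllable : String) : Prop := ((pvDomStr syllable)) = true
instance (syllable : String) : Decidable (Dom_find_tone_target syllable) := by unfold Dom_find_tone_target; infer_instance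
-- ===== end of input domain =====

-- B replaces A's priority-ordered chain of substring .find() passes by one left-to-right
-- scan keeping the best (rank, index) candidate (alternative decomposition, same O(n) cost).


-- ===== PORT A =====
-- the 'for vowel in (…): index = lower.find(vowel); if index != -1: return index' loops
def pvFindFirst (lower : String) : List String → Option Int
  | [] => none
  | v :: vs =>
    let index := PySem.Str.find lower v
    if index ≠ -1 then some index else pvFindFirst lower vs

def find_tone_target (syllable : String) : Option Int :=
  let lower := PySem.Str.lower syllable
  match pvFindFirst lower ["a", "e"] with
  | some index => some index
  | none =>
    let oo_index := PySem.Str.find lower "oo"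
    if oo_index ≠ -1 then some oo_index
    else pvFindFirst lower ["o", "i", "u", "m", "n"]

-- ===== PORT B =====
-- rank of a character; `next` is the following character (Source B's `lower[i+1]` lookahead)
def pvRank (ch : Char) (next : Option Char) : Option Nat :=
  if ch = 'a' then some 0
  else if ch = 'e' then some 1
  else if ch = 'o' then some (if next = some 'o' then 2 else 3)
  else if ch = 'i' then some 4
  else if ch = 'u' then some 5
  else if ch = 'm' then some 6
  else if ch = 'n' then some 7
  else none

-- Source B's loop: i the current index, best the current (rank, index) pair
def pvScan : List Char → Nat → Option (Nat × Nat) → Option (Nat × Nat)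
  | [], _, best => best
  | ch :: rest, i, best =>
    match pvRank ch rest.head? with
    | none => pvScan rest (i + 1) best
    | some rank =>
      pvScan rest (i + 1)
        (match best with
         | none => some (rank, i)
         | some b => if rank < b.1 then some (rank, i) else best)

def find_tone_target_alt (syllable : String) : Option Int :=
  let lower := (PySem.Str.lower syllable).toList
  match pvScan lower 0 none with
  | some b => some (b.2 : Int)
  | none => none

-- ===== PRECONDITION & SPEC =====
def Spec_find_tone_target (syllable : String) (out : Option Int) : Prop := out = find_tone_target_alt syllable
instance (syllable : String) (out : Option Int) : Decidable (Spec_find_tone_target syllable out) := by unfold Spec_find_tone_target; infer_instance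

-- ===== CLAIM (what is proved, stated in full; the proofs are below) =====
def Claim_equal_find_tone_target : Prop := ∀ (syllable : String), Dom_find_tone_target syllable → Spec_find_tone_target syllable (find_tone_target syllable)

-- ===== LEMMAS AND PROOFS =====

-- rank of position j in l (what B computes at index j)
def pvRankIdx (l : List Char) (j : Nat) : Option Nat :=
  match l[j]? with
  | none => none
  | some c => pvRank c l[j+1]?

-- first index j in [i, i+n) with p j, scanning upward
def pvFirst (p : Nat → Bool) : Nat → Nat → Option Nat
  | _, 0 => none
  | i, n+1 => if p i then some i else pvFirst p (i+1) n

theorem pvFirst_eq_none_iff (p : Nat → Bool) (i n : Nat) :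
    pvFirst p i n = none ↔ ∀ j, i ≤ j → j < i + n → p j = false := by
  induction n generalizing i with
  | zero => simp [pvFirst]; intro j h1 h2; omega
  | succ n ih =>
    simp only [pvFirst]
    by_cases hpi : p i
    · simp [hpi]
      exact ⟨i, le_refl i, by omega, hpi⟩
    · simp only [hpi, Bool.false_eq_true, if_false, ih]
      constructor
      · intro h j h1 h2
        rcases Nat.eq_or_lt_of_le h1 with rfl | h1
        · exact Bool.eq_false_iff.mpr hpi
        · exact h j h1 (by omega)
      · intro h j h1 h2; exact h j (by omega) (by omega)

theorem pvFirst_eq_some_iff (p : Nat → Bool) (i n j : Nat) :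
    pvFirst p i n = some j ↔
      i ≤ j ∧ j < i + n ∧ p j = true ∧ ∀ j', i ≤ j' → j' < j → p j' = false := by
  induction n generalizing i with
  | zero => simp [pvFirst]; intro h1 h2; omega
  | succ n ih =>
    simp only [pvFirst]
    by_cases hpi : p i
    · simp only [hpi, if_true, Option.some_inj]
      constructor
      · rintro rfl
        exact ⟨le_refl _, by omega, hpi, fun j' h1 h2 => by omega⟩
      · rintro ⟨h1, h2, h3, h4⟩
        rcases Nat.eq_or_lt_of_le h1 with rfl | h1
        · rfl
        · exact absurd hpi (by simpa using h4 i (le_refl i) h1)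
    · simp only [hpi, Bool.false_eq_true, if_false, ih]
      constructor
      · rintro ⟨h1, h2, h3, h4⟩
        refine ⟨by omega, by omega, h3, fun j' h1' h2' => ?_⟩
        rcases Nat.eq_or_lt_of_le h1' with rfl | h1'
        · exact Bool.eq_false_iff.mpr hpi
        · exact h4 j' h1' h2'
      · rintro ⟨h1, h2, h3, h4⟩
        have : i ≠ j := by rintro rfl; exact hpi h3
        exact ⟨by omega, by omega, h3, fun j' h1' h2' => h4 j' (by omega) h2'⟩

-- ---- bridging PySem.Chars.find to pvFirst ----

theorem pv_prefix_singleton (c : Char) (xs : List Char) : [c] <+: xs ↔ xs.head? = some c := by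
  cases xs with
  | nil => simp
  | cons y ys => simp [List.cons_prefix_cons, eq_comm]

theorem pv_prefix_pair (c d : Char) (xs : List Char) :
    [c, d] <+: xs ↔ xs[0]? = some c ∧ xs[1]? = some d := by
  cases xs with
  | nil => simp
  | cons y ys =>
    cases ys with
    | nil => simp [List.cons_prefix_cons]
    | cons z zs =>
      simp [List.cons_prefix_cons, eq_comm]

theorem pv_find_spec (l sub : List Char) (P : Nat → Bool)
    (hP : ∀ j, sub <+: l.drop j ↔ P j = true)
    (hlen : ∀ j, P j = true → j < l.length) :
    PySem.Chars.find l sub =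
      match pvFirst P 0 l.length with | some j => (j : Int) | none => -1 := by
  cases h : pvFirst P 0 l.length with
  | none =>
    rw [(PySem.Chars.find_eq_neg_one_iff l sub)]
    intro hinf
    obtain ⟨j, hj⟩ := (PySem.Chars.exists_prefix_drop_iff_isIn sub l).mpr
      ((PySem.Chars.isIn_iff_infix sub l).mpr hinf) |>.imp (fun j h => h) |> fun x => x
    have hPj : P j = true := (hP j).mp hj
    exact absurd hPj (by simpa using (pvFirst_eq_none_iff P 0 l.length).mp h j (Nat.zero_le j) (by simpa using hlen j hPj))
  | some j =>
    obtain ⟨-, hjlt, hPj, hmin⟩ := (pvFirst_eq_some_iff P 0 l.length j).mp h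
    have hpre : sub <+: l.drop j := (hP j).mpr hPj
    have hinf : sub <:+: l := (PySem.Chars.isIn_iff_infix sub l).mp
      ((PySem.Chars.exists_prefix_drop_iff_isIn sub l).mp ⟨j, hpre⟩)
    have hnn : 0 ≤ PySem.Chars.find l sub := (PySem.Chars.find_nonneg_iff l sub).mpr hinf
    obtain ⟨hfpre, hfmin⟩ := PySem.Chars.find_spec hnn
    set f := (PySem.Chars.find l sub).toNat with hf
    have h1 : ¬ j < f := fun hlt => (hfmin j hlt) hpre
    have h2 : ¬ f < j := fun hlt => by
      have := hmin f (Nat.zero_le f) hlt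
      exact absurd ((hP f).mp hfpre) (by simp [this])
    have : f = j := by omega
    simp only []
    omega

-- ---- candidate list, step, best ----

def pvCands (l : List Char) (i n : Nat) : List (Nat × Nat) :=
  (List.range' i n).filterMap (fun j => (pvRankIdx l j).map (fun r => (r, j)))

def pvStep (b : Option (Nat × Nat)) (p : Nat × Nat) : Option (Nat × Nat) :=
  match b with
  | none => some p
  | some q => if p.1 < q.1 then some p else b

theorem pv_mem_cands (l : List Char) (i n : Nat) (p : Nat × Nat) :
    p ∈ pvCands l i n ↔ i ≤ p.2 ∧ p.2 < i + n ∧ pvRankIdx l p.2 = some p.1 := by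
  simp only [pvCands, List.mem_filterMap, List.mem_range'_1, Option.map_eq_some_iff]
  constructor
  · rintro ⟨j, ⟨h1, h2⟩, r, hr, rfl⟩
    exact ⟨h1, h2, hr⟩
  · rintro ⟨h1, h2, h3⟩
    exact ⟨p.2, ⟨h1, h2⟩, p.1, h3, rfl⟩

theorem pv_cands_pairwise (l : List Char) (i n : Nat) :
    List.Pairwise (fun p q : Nat × Nat => p.2 < q.2) (pvCands l i n) := by
  refine List.Pairwise.filterMap _ ?_ (List.pairwise_lt_range' (s := i) (n := n) 1)
  rintro a a' hlt b hb b' hb'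
  rcases Option.map_eq_some_iff.mp hb with ⟨r, -, rfl⟩
  rcases Option.map_eq_some_iff.mp hb' with ⟨r', -, rfl⟩
  exact hlt

-- B's scan is the fold of pvStep over the candidate list
theorem pv_scan_eq_foldl (l : List Char) :
    ∀ s i b, s = l.drop i → pvScan s i b = List.foldl pvStep b (pvCands l i s.length) := by
  intro s
  induction s with
  | nil => intro i b _; simp [pvScan, pvCands]
  | cons c rest ih =>
    intro i b hs
    have hci : l[i]? = some c := by
      rw [← List.head?_drop, ← hs]; rfl
    have hrest : rest = l.drop (i+1) := by
      have : l.drop (i+1) = (l.drop i).tail := by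
        rw [← List.drop_drop]; simp
      rw [this, ← hs]
      rfl
    have hnext : rest.head? = l[i+1]? := by rw [hrest, List.head?_drop]
    have hrank : pvRankIdx l i = pvRank c rest.head? := by
      simp [pvRankIdx, hci, hnext]
    simp only [pvCands, List.length_cons, List.range'_succ, List.filterMap_cons]
    rw [← pvCands]
    cases hr : pvRank c rest.head? with
    | none =>
      simp only [pvScan, hr, hrank]
      exact ih (i+1) b hrest
    | some rank =>
      simp only [pvScan, hr, hrank, Option.map_some, List.foldl_cons]
      rw [ih (i+1) _ hrest]
      congr 1

-- the lexicographically best candidate: minimal rank, then minimal index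
def pvIsBest (p : Nat × Nat) (cs : List (Nat × Nat)) : Prop :=
  p ∈ cs ∧ ∀ q ∈ cs, p.1 < q.1 ∨ (p.1 = q.1 ∧ p.2 ≤ q.2)

theorem pv_best_unique {p q : Nat × Nat} {cs : List (Nat × Nat)}
    (h1 : pvIsBest p cs) (h2 : pvIsBest q cs) : p = q := by
  rcases h1 with ⟨hp, hpd⟩
  rcases h2 with ⟨hq, hqd⟩
  rcases hpd q hq with h | ⟨hr, hi⟩ <;> rcases hqd p hp with h' | ⟨hr', hi'⟩
  all_goals first
    | omega
    | (exact Prod.ext (by omega) (by omega))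

theorem pv_foldl_step_best :
    ∀ (cs : List (Nat × Nat)) (p0 : Nat × Nat),
      List.Pairwise (fun p q : Nat × Nat => p.2 < q.2) cs →
      (∀ q ∈ cs, p0.2 < q.2) →
      ∃ p, List.foldl pvStep (some p0) cs = some p ∧ pvIsBest p (p0 :: cs) := by
  intro cs
  induction cs with
  | nil =>
    intro p0 _ _
    refine ⟨p0, rfl, List.mem_cons_self, ?_⟩
    intro q hq
    rcases List.mem_cons.mp hq with heq | h
    · rw [heq]; right; exact ⟨rfl, le_refl _⟩
    · simp at h
  | cons c cs ih =>
    intro p0 hpw hlt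
    rcases List.pairwise_cons.mp hpw with ⟨hc, hpw'⟩
    have hp0c : p0.2 < c.2 := hlt c (List.mem_cons_self)
    by_cases hrank : c.1 < p0.1
    · -- c replaces p0
      have hstep : pvStep (some p0) c = some c := by simp [pvStep, hrank]
      obtain ⟨p, hfold, hmem, hdom⟩ := ih c hpw' hc
      refine ⟨p, by rw [List.foldl_cons, hstep]; exact hfold, ?_, ?_⟩
      · rcases List.mem_cons.mp hmem with heq | h
        · rw [heq]; exact List.mem_cons_of_mem _ List.mem_cons_self
        · exact List.mem_cons_of_mem _ (List.mem_cons_of_mem _ h)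
      · intro q hq
        rcases List.mem_cons.mp hq with heq | hq'
        · -- q = p0 : p beats c, c beats p0 on rank
          rw [heq]
          rcases hdom c List.mem_cons_self with h | ⟨hr, -⟩
          · left; omega
          · left; omega
        · exact hdom q hq'
    · -- p0 stays
      have hstep : pvStep (some p0) c = some p0 := by simp [pvStep, hrank]
      obtain ⟨p, hfold, hmem, hdom⟩ := ih p0 hpw' (fun q hq => hlt q (List.mem_cons_of_mem _ hq))
      refine ⟨p, by rw [List.foldl_cons, hstep]; exact hfold, ?_, ?_⟩
      · rcases List.mem_cons.mp hmem with heq | h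
        · rw [heq]; exact List.mem_cons_self
        · exact List.mem_cons_of_mem _ (List.mem_cons_of_mem _ h)
      · intro q hq
        rcases List.mem_cons.mp hq with heq | hq'
        · -- q = p0
          rw [heq]; exact hdom p0 List.mem_cons_self
        · rcases List.mem_cons.mp hq' with heq | hq''
          · -- q = c; p beats p0, and p0.1 ≤ c.1
            rw [heq]
            rcases hdom p0 List.mem_cons_self with h | ⟨hr, hi⟩
            · left; omega
            · rcases Nat.lt_or_ge p.1 c.1 with h' | h'
              · left; exact h'
              · have hpc : p.1 = c.1 := by omega
                right
                refine ⟨hpc, ?_⟩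
                -- p ∈ p0 :: cs; elements of cs have index > c.2, so p = p0 here
                rcases List.mem_cons.mp hmem with heq2 | hmemcs
                · rw [heq2]; omega
                · have := hc p hmemcs; omega
          · exact hdom q (List.mem_cons_of_mem _ hq'')

-- ---- the rank-priority chain (A's structure over the candidate ranks) ----

def pvFk (l : List Char) (k : Nat) : Option Nat :=
  pvFirst (fun j => pvRankIdx l j == some k) 0 l.length

def pvChainP (l : List Char) : Option (Nat × Nat) :=
  match pvFk l 0 with
  | some i => some (0, i)
  | none => match pvFk l 1 with
    | some i => some (1, i)
    | none => match pvFk l 2 with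
      | some i => some (2, i)
      | none => match pvFk l 3 with
        | some i => some (3, i)
        | none => match pvFk l 4 with
          | some i => some (4, i)
          | none => match pvFk l 5 with
            | some i => some (5, i)
            | none => match pvFk l 6 with
              | some i => some (6, i)
              | none => match pvFk l 7 with
                | some i => some (7, i)
                | none => none

theorem pv_rank_le_seven (c : Char) (next : Option Char) (r : Nat)
    (h : pvRank c next = some r) : r ≤ 7 := by
  unfold pvRank at h
  split_ifs at h <;> simp_all <;> omega

theorem pv_rankIdx_lt_length (l : List Char) (j r : Nat) (h : pvRankIdx l j = some r) :
    j < l.length := by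
  unfold pvRankIdx at h
  cases hj : l[j]? with
  | none => rw [hj] at h; simp at h
  | some c => exact (List.getElem?_eq_some_iff.mp hj).1

theorem pv_slot_best (l : List Char) (k i : Nat)
    (hfk : pvFk l k = some i) (hlow : ∀ k' < k, pvFk l k' = none) :
    pvIsBest (k, i) (pvCands l 0 l.length) := by
  obtain ⟨-, hilt, hPi, hmin⟩ := (pvFirst_eq_some_iff _ 0 l.length i).mp hfk
  have hri : pvRankIdx l i = some k := by simpa using hPi
  constructor
  · exact (pv_mem_cands l 0 l.length (k, i)).mpr ⟨Nat.zero_le _, by simpa using hilt, hri⟩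
  · rintro ⟨r, j⟩ hq
    obtain ⟨-, hjlt, hrj⟩ := (pv_mem_cands l 0 l.length (r, j)).mp hq
    simp only at hjlt hrj ⊢
    rcases Nat.lt_trichotomy k r with h | h | h
    · left; exact h
    · subst h
      right
      refine ⟨rfl, ?_⟩
      by_contra hji
      have := hmin j (Nat.zero_le j) (by omega)
      simp [hrj] at this
    · -- r < k : slot r is empty, contradiction
      have hnone := hlow r h
      have := (pvFirst_eq_none_iff _ 0 l.length).mp hnone j (Nat.zero_le j) (by simpa using hjlt)
      simp [hrj] at this

theorem pv_chainP_slots_none (l : List Char) (h : pvChainP l = none) :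
    ∀ k, k ≤ 7 → pvFk l k = none := by
  unfold pvChainP at h
  cases h0 : pvFk l 0 <;> rw [h0] at h
  case some => exact absurd h (by simp)
  cases h1 : pvFk l 1 <;> rw [h1] at h
  case some => exact absurd h (by simp)
  cases h2 : pvFk l 2 <;> rw [h2] at h
  case some => exact absurd h (by simp)
  cases h3 : pvFk l 3 <;> rw [h3] at h
  case some => exact absurd h (by simp)
  cases h4 : pvFk l 4 <;> rw [h4] at h
  case some => exact absurd h (by simp)
  cases h5 : pvFk l 5 <;> rw [h5] at h
  case some => exact absurd h (by simp)
  cases h6 : pvFk l 6 <;> rw [h6] at h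
  case some => exact absurd h (by simp)
  cases h7 : pvFk l 7 <;> rw [h7] at h
  case some => exact absurd h (by simp)
  intro k hk
  interval_cases k <;> assumption

theorem pv_chainP_none (l : List Char) (h : pvChainP l = none) :
    pvCands l 0 l.length = [] := by
  rw [List.eq_nil_iff_forall_not_mem]
  rintro ⟨r, j⟩ hq
  obtain ⟨-, hjlt, hrj⟩ := (pv_mem_cands l 0 l.length (r, j)).mp hq
  have hr7 : r ≤ 7 := by
    unfold pvRankIdx at hrj
    cases hj : l[j]? with
    | none => rw [hj] at hrj; simp at hrj
    | some c => rw [hj] at hrj; exact pv_rank_le_seven c _ r hrj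
  have hnone := pv_chainP_slots_none l h r hr7
  have := (pvFirst_eq_none_iff _ 0 l.length).mp hnone j (Nat.zero_le j) (by simpa using hjlt)
  simp [hrj] at this

theorem pv_chainP_best (l : List Char) (p : Nat × Nat) (h : pvChainP l = some p) :
    pvIsBest p (pvCands l 0 l.length) := by
  unfold pvChainP at h
  cases h0 : pvFk l 0 with
  | some i => rw [h0] at h; injection h with h; subst h
              exact pv_slot_best l 0 i h0 (by omega)
  | none => rw [h0] at h; cases h1 : pvFk l 1 with
    | some i => rw [h1] at h; injection h with h; subst h
                exact pv_slot_best l 1 i h1 (by intro k hk; interval_cases k; assumption)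
    | none => rw [h1] at h; cases h2 : pvFk l 2 with
      | some i => rw [h2] at h; injection h with h; subst h
                  exact pv_slot_best l 2 i h2 (by intro k hk; interval_cases k <;> assumption)
      | none => rw [h2] at h; cases h3 : pvFk l 3 with
        | some i => rw [h3] at h; injection h with h; subst h
                    exact pv_slot_best l 3 i h3 (by intro k hk; interval_cases k <;> assumption)
        | none => rw [h3] at h; cases h4 : pvFk l 4 with
          | some i => rw [h4] at h; injection h with h; subst h
                      exact pv_slot_best l 4 i h4 (by intro k hk; interval_cases k <;> assumption)
          | none => rw [h4] at h; cases h5 : pvFk l 5 with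
            | some i => rw [h5] at h; injection h with h; subst h
                        exact pv_slot_best l 5 i h5 (by intro k hk; interval_cases k <;> assumption)
            | none => rw [h5] at h; cases h6 : pvFk l 6 with
              | some i => rw [h6] at h; injection h with h; subst h
                          exact pv_slot_best l 6 i h6 (by intro k hk; interval_cases k <;> assumption)
              | none => rw [h6] at h; cases h7 : pvFk l 7 with
                | some i => rw [h7] at h; injection h with h; subst h
                            exact pv_slot_best l 7 i h7 (by intro k hk; interval_cases k <;> assumption)
                | none => rw [h7] at h; exact absurd h (by simp)

theorem pv_best_eq_chainP (l : List Char) :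
    List.foldl pvStep none (pvCands l 0 l.length) = pvChainP l := by
  cases hcs : pvCands l 0 l.length with
  | nil =>
    cases hch : pvChainP l with
    | none => simp
    | some p =>
      have := (pv_chainP_best l p hch).1
      rw [hcs] at this
      simp at this
  | cons c cs =>
    have hpw := pv_cands_pairwise l 0 l.length
    rw [hcs] at hpw
    rcases List.pairwise_cons.mp hpw with ⟨hc, hpw'⟩
    obtain ⟨p, hfold, hbest⟩ := pv_foldl_step_best cs c hpw' hc
    have hfold' : List.foldl pvStep none (c :: cs) = some p := by
      simpa [pvStep] using hfold
    rw [hfold']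
    cases hch : pvChainP l with
    | none =>
      have := pv_chainP_none l hch
      rw [hcs] at this
      simp at this
    | some q =>
      have hq := pv_chainP_best l q hch
      rw [hcs] at hq
      exact congrArg some (pv_best_unique hbest hq)

-- ---- pointwise rank characterizations ----

theorem pv_rank_eq_iff_a (c : Char) (next : Option Char) :
    (pvRank c next = some 0) ↔ c = 'a' := by
  unfold pvRank; split_ifs <;> simp_all

theorem pv_rank_eq_iff_e (c : Char) (next : Option Char) :
    (pvRank c next = some 1) ↔ c = 'e' := by
  unfold pvRank; split_ifs <;> simp_all

theorem pv_rank_eq_iff_oo (c : Char) (next : Option Char) :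
    (pvRank c next = some 2) ↔ (c = 'o' ∧ next = some 'o') := by
  unfold pvRank; split_ifs <;> simp_all

theorem pv_rank_eq_iff_i (c : Char) (next : Option Char) :
    (pvRank c next = some 4) ↔ c = 'i' := by
  unfold pvRank; split_ifs <;> simp_all

theorem pv_rank_eq_iff_u (c : Char) (next : Option Char) :
    (pvRank c next = some 5) ↔ c = 'u' := by
  unfold pvRank; split_ifs <;> simp_all

theorem pv_rank_eq_iff_m (c : Char) (next : Option Char) :
    (pvRank c next = some 6) ↔ c = 'm' := by
  unfold pvRank; split_ifs <;> simp_all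

theorem pv_rank_eq_iff_n (c : Char) (next : Option Char) :
    (pvRank c next = some 7) ↔ c = 'n' := by
  unfold pvRank; split_ifs <;> simp_all

theorem pv_rank_eq_iff_o (c : Char) (next : Option Char) :
    (pvRank c next = some 3) ↔ (c = 'o' ∧ next ≠ some 'o') := by
  unfold pvRank; split_ifs <;> simp_all

-- find of a single candidate char = the fk slot of its rank
theorem pv_find_char (l : List Char) (c : Char) (k : Nat)
    (hiff : ∀ (c' : Char) (next : Option Char), (pvRank c' next = some k) ↔ c' = c) :
    PySem.Chars.find l [c] =
      match pvFk l k with | some j => (j : Int) | none => -1 := by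
  have hpt : ∀ j, ([c] <+: l.drop j) ↔ (pvRankIdx l j == some k) = true := by
    intro j
    rw [pv_prefix_singleton, List.head?_drop]
    unfold pvRankIdx
    cases hj : l[j]? with
    | none => simp
    | some c' => simp [hiff c' l[j+1]?]
  rw [pv_find_spec l [c] (fun j => pvRankIdx l j == some k)
        hpt (fun j h => pv_rankIdx_lt_length l j k (by simpa using h))]
  rfl

theorem pv_find_oo (l : List Char) :
    PySem.Chars.find l ['o','o'] =
      match pvFk l 2 with | some j => (j : Int) | none => -1 := by
  have hpt : ∀ j, (['o','o'] <+: l.drop j) ↔ (pvRankIdx l j == some 2) = true := by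
    intro j
    rw [pv_prefix_pair]
    have h0 : (l.drop j)[0]? = l[j]? := by simp [List.getElem?_drop]
    have h1 : (l.drop j)[1]? = l[j+1]? := by simp [List.getElem?_drop]
    rw [h0, h1]
    unfold pvRankIdx
    cases hj : l[j]? with
    | none => simp
    | some c' => simp [pv_rank_eq_iff_oo c' l[j+1]?]
  rw [pv_find_spec l ['o','o'] (fun j => pvRankIdx l j == some 2)
        hpt (fun j h => pv_rankIdx_lt_length l j 2 (by simpa using h))]
  rfl

-- find of 'o' when there is no 'oo' = the rank-3 slot
theorem pv_find_o (l : List Char) (h2 : pvFk l 2 = none) :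
    PySem.Chars.find l ['o'] =
      match pvFk l 3 with | some j => (j : Int) | none => -1 := by
  have hnone := (pvFirst_eq_none_iff _ 0 l.length).mp h2
  have hpt : ∀ j, (['o'] <+: l.drop j) ↔ (pvRankIdx l j == some 3) = true := by
    intro j
    rw [pv_prefix_singleton, List.head?_drop]
    unfold pvRankIdx
    cases hj : l[j]? with
    | none => simp
    | some c' =>
      simp only [Option.some_inj, beq_iff_eq]
      constructor
      · intro hc; subst hc
        by_cases hn : l[j+1]? = some 'o'
        · exfalso
          have hjlen : j < l.length := (List.getElem?_eq_some_iff.mp hj).1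
          have := hnone j (Nat.zero_le j) (by simpa using hjlen)
          have hr2 : pvRankIdx l j = some 2 := by
            unfold pvRankIdx; rw [hj]
            exact (pv_rank_eq_iff_oo 'o' l[j+1]?).mpr ⟨rfl, hn⟩
          simp [hr2] at this
        · exact (pv_rank_eq_iff_o 'o' l[j+1]?).mpr ⟨rfl, hn⟩
      · intro hr
        exact ((pv_rank_eq_iff_o c' l[j+1]?).mp hr).1
  rw [pv_find_spec l ['o'] (fun j => pvRankIdx l j == some 3)
        hpt (fun j h => pv_rankIdx_lt_length l j 3 (by simpa using h))]
  rfl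

-- ---- assembling the two sides ----

theorem pv_A_eq_chainP (syllable : String) :
    find_tone_target syllable =
      (pvChainP (PySem.Str.lower syllable).toList).map (fun p => (p.2 : Int)) := by
  set L := (PySem.Str.lower syllable).toList with hL
  have hfind : ∀ v : String, PySem.Str.find (PySem.Str.lower syllable) v = PySem.Chars.find L v.toList :=
    fun v => PySem.Str.find_eq _ _
  simp only [find_tone_target, pvFindFirst, hfind]
  have ha : ("a" : String).toList = ['a'] := rfl
  have he : ("e" : String).toList = ['e'] := rfl
  have hoo : ("oo" : String).toList = ['o','o'] := rfl
  have ho : ("o" : String).toList = ['o'] := rfl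
  have hi : ("i" : String).toList = ['i'] := rfl
  have hu : ("u" : String).toList = ['u'] := rfl
  have hm : ("m" : String).toList = ['m'] := rfl
  have hn : ("n" : String).toList = ['n'] := rfl
  rw [ha, he, hoo, ho, hi, hu, hm, hn]
  rw [pv_find_char L 'a' 0 pv_rank_eq_iff_a, pv_find_char L 'e' 1 pv_rank_eq_iff_e,
      pv_find_oo L,
      pv_find_char L 'i' 4 pv_rank_eq_iff_i, pv_find_char L 'u' 5 pv_rank_eq_iff_u,
      pv_find_char L 'm' 6 pv_rank_eq_iff_m, pv_find_char L 'n' 7 pv_rank_eq_iff_n]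
  unfold pvChainP
  cases h0 : pvFk L 0 with
  | some i => simp
  | none =>
    simp only []
    cases h1 : pvFk L 1 with
    | some i => simp
    | none =>
      simp only []
      cases h2 : pvFk L 2 with
      | some i => simp
      | none =>
        rw [pv_find_o L h2]
        simp only []
        cases h3 : pvFk L 3 with
        | some i => simp
        | none =>
          simp only []
          cases h4 : pvFk L 4 with
          | some i => simp
          | none =>
            simp only []
            cases h5 : pvFk L 5 with
            | some i => simp
            | none =>
              simp only []
              cases h6 : pvFk L 6 with
              | some i => simp
              | none =>
                simp only []
                cases h7 : pvFk L 7 with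
                | some i => simp
                | none => simp

theorem pv_B_eq_best (syllable : String) :
    find_tone_target_alt syllable =
      (List.foldl pvStep none
        (pvCands (PySem.Str.lower syllable).toList 0 (PySem.Str.lower syllable).toList.length)).map
        (fun p => (p.2 : Int)) := by
  have h := pv_scan_eq_foldl (PySem.Str.lower syllable).toList (PySem.Str.lower syllable).toList 0 none (by simp)
  show (match pvScan (PySem.Str.lower syllable).toList 0 none with
        | some b => some ((b.2 : Int))
        | none => none) = _
  rw [h]
  cases List.foldl pvStep none _ with
  | none => rfl
  | some b => rfl

-- ===== VERDICT (by name: the statement is the Claim_ definition above) =====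
theorem find_tone_target_spec : Claim_equal_find_tone_target := by
  intro syllable _
  unfold Spec_find_tone_target
  rw [pv_A_eq_chainP, pv_B_eq_best, pv_best_eq_chainP]
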